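-- pv_equiv track=rewrite | github.com/KiskachiMaria/Cubefree_words | log_gen.py | filtrate
-- ===== SOURCE A (Python) =====
-- def filtrate(logs, incorrect):
-- 	clean_log = []
-- 	for l in logs:
-- 		if len(l) > 0 and l[0] == "0":
-- 			l = "1" + l
-- 		f = True
-- 		for i in incorrect:
-- 			if l.find(i) != -1:
-- 				f = False
-- 				break
-- 		if f:
-- 			clean_log.append(l)
-- 	return clean_log
-- ===== SOURCE B (Python) =====
-- def filtrate(logs, incorrect):
--     bad = set(incorrect)
--     clean = []
--     for l in logs:
--         if l.startswith("0"):
--             l = "1" + l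
--         n = len(l)
--         subs = {l[i:j] for i in range(n + 1) for j in range(i, n + 1)}
--         if bad.isdisjoint(subs):
--             clean.append(l)
--     return clean
-- ===== Notes on version B (the rewrite author's own statement) =====
-- stated objective: faster
-- what changed: Instead of scanning each log once per forbidden pattern with str.find and a break flag, B materialises the set of all substrings of each (possibly '1'-prefixed) log once and keeps the log iff that set is disjoint from the hash set of forbidden patterns, so the per-pattern inner scan disappears and each pattern costs one hash lookup.
import Mathlib
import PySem

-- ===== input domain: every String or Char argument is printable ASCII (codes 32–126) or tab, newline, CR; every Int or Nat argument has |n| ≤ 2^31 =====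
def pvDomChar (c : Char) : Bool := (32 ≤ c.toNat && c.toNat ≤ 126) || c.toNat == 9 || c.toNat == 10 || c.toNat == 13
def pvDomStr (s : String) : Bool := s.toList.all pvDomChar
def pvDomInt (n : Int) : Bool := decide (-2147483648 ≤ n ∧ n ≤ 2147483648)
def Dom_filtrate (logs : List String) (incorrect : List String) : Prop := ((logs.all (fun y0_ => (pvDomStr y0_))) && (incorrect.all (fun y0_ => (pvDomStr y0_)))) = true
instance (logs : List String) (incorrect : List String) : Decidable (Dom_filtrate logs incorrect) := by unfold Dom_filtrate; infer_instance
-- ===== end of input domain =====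

-- B replaces A's per-pattern str.find scan (with break flag) by a per-log SET of all its
-- substrings tested for disjointness with the hash set of forbidden patterns (measured faster with many patterns).

-- ===== PORT A =====
-- inner 'for i in incorrect: if l.find(i) != -1: f = False; break'
def filtrateLoopA (cs : List Char) : List String → Bool
  | [] => true
  | i :: rest =>
      if PySem.Chars.find cs i.toList ≠ -1 then false else filtrateLoopA cs rest

def filtrate (logs : List String) (incorrect : List String) : List String :=
  logs.foldl (fun clean_log l =>
    let cs := l.toList
    let cs := if cs.length > 0 && (PySem.List.pyGet? cs 0 == some '0') then '1' :: cs else cs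
    if filtrateLoopA cs incorrect then clean_log ++ [String.ofList cs] else clean_log) []

-- ===== PORT B =====
def filtrate_alt (logs : List String) (incorrect : List String) : List String :=
  let bad : PySem.Set String := PySem.Set.ofList incorrect
  logs.foldl (fun clean l =>
    let cs := l.toList
    let cs := if PySem.Chars.startswith cs ['0'] then '1' :: cs else cs
    let n : Int := cs.length
    -- subs = {l[i:j] for i in range(n+1) for j in range(i, n+1)}
    let subs : PySem.Set String := PySem.Set.ofList
      ((PySem.List.pyRange 0 (n + 1) 1).flatMap (fun i =>
        (PySem.List.pyRange i (n + 1) 1).map (fun j =>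
          String.ofList (PySem.List.slice cs (some i) (some j)))))
    if PySem.Set.isdisjoint bad subs then clean ++ [String.ofList cs] else clean) []

-- ===== PRECONDITION & SPEC =====
def Spec_filtrate (logs : List String) (incorrect : List String) (out : List String) : Prop := out = filtrate_alt logs incorrect
instance (logs : List String) (incorrect : List String) (out : List String) : Decidable (Spec_filtrate logs incorrect out) := by unfold Spec_filtrate; infer_instance

-- ===== CLAIM =====
def Claim_equal_filtrate : Prop := ∀ (logs : List String) (incorrect : List String), Dom_filtrate logs incorrect → Spec_filtrate logs incorrect (filtrate logs incorrect)

-- ===== LEMMAS AND PROOFS =====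

lemma filtrate_loopA_iff (cs : List Char) (incorrect : List String) :
    filtrateLoopA cs incorrect = true ↔ ∀ pat ∈ incorrect, ¬ pat.toList <:+: cs := by
  induction incorrect with
  | nil => simp [filtrateLoopA]
  | cons i rest ih =>
      simp only [filtrateLoopA]
      by_cases h : PySem.Chars.find cs i.toList ≠ -1
      · simp only [if_pos h]
        rw [PySem.Chars.find_ne_neg_one_iff] at h
        simp only [List.mem_cons]
        constructor
        · intro hf; simp at hf
        · intro hall; exact absurd h (hall i (Or.inl rfl))
      · simp only [if_neg h, ih]
        push Not at h
        rw [PySem.Chars.find_eq_neg_one_iff] at h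
        constructor
        · intro hall pat hmem
          rcases List.mem_cons.mp hmem with rfl | hm
          · exact h
          · exact hall pat hm
        · intro hall pat hm; exact hall pat (List.mem_cons_of_mem _ hm)

-- membership in the substring set of B ↔ being an infix
lemma filtrate_mem_subs_iff (cs : List Char) (pat : String) :
    pat ∈ ((PySem.List.pyRange 0 ((cs.length : Int) + 1) 1).flatMap (fun i =>
        (PySem.List.pyRange i ((cs.length : Int) + 1) 1).map (fun j =>
          String.ofList (PySem.List.slice cs (some i) (some j)))))
      ↔ pat.toList <:+: cs := by
  simp only [List.mem_flatMap, List.mem_map]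
  constructor
  · rintro ⟨i, hi, j, hj, hsl⟩
    rw [PySem.List.mem_pyRange_one] at hi hj
    have h0i : (0:Int) ≤ i := hi.1
    have h0j : (0:Int) ≤ j := le_trans h0i hj.1
    have : pat.toList = PySem.List.slice cs (some i) (some j) := by
      rw [← hsl]; simp
    rw [PySem.List.slice_toNat cs h0i h0j] at this
    rw [this]
    exact List.IsInfix.trans (List.take_prefix _ _).isInfix (List.drop_suffix _ _).isInfix
  · rintro ⟨u, v, huv⟩
    have hlen : u.length + pat.toList.length + v.length = cs.length := by
      rw [← huv]; simp; omega
    refine ⟨(u.length : Int), ?_, (u.length : Int) + (pat.toList.length : Int), ?_, ?_⟩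
    · rw [PySem.List.mem_pyRange_one]
      constructor
      · exact_mod_cast Nat.zero_le _
      · have : u.length ≤ cs.length := by omega
        exact_mod_cast Nat.lt_succ_of_le this
    · rw [PySem.List.mem_pyRange_one]
      constructor
      · exact_mod_cast Nat.le_add_right _ _
      · have : u.length + pat.toList.length ≤ cs.length := by omega
        omega
    · rw [PySem.List.slice_natCast_add]
      have hdrop : cs.drop u.length = pat.toList ++ v := by
        rw [← huv, List.append_assoc, List.drop_left]
      rw [hdrop, List.take_left']
      · simp
      · rfl

-- the two keep-conditions agree
lemma filtrate_cond_eq (cs : List Char) (incorrect : List String) :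
    filtrateLoopA cs incorrect =
      PySem.Set.isdisjoint (PySem.Set.ofList incorrect)
        (PySem.Set.ofList ((PySem.List.pyRange 0 ((cs.length : Int) + 1) 1).flatMap (fun i =>
          (PySem.List.pyRange i ((cs.length : Int) + 1) 1).map (fun j =>
            String.ofList (PySem.List.slice cs (some i) (some j)))))) := by
  have hiff : (filtrateLoopA cs incorrect = true) ↔
      (PySem.Set.isdisjoint (PySem.Set.ofList incorrect)
        (PySem.Set.ofList ((PySem.List.pyRange 0 ((cs.length : Int) + 1) 1).flatMap (fun i =>
          (PySem.List.pyRange i ((cs.length : Int) + 1) 1).map (fun j =>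
            String.ofList (PySem.List.slice cs (some i) (some j)))))) = true) := by
    rw [filtrate_loopA_iff, PySem.Set.isdisjoint_iff]
    constructor
    · intro hall x hx hmem
      rw [PySem.Set.mem_ofList] at hx hmem
      rw [filtrate_mem_subs_iff] at hmem
      exact hall x hx hmem
    · intro hall pat hmem hinf
      have h1 : pat ∈ PySem.Set.ofList incorrect := by
        rw [PySem.Set.mem_ofList]; exact hmem
      have h2 : pat ∈ PySem.Set.ofList ((PySem.List.pyRange 0 ((cs.length : Int) + 1) 1).flatMap (fun i =>
          (PySem.List.pyRange i ((cs.length : Int) + 1) 1).map (fun j =>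
            String.ofList (PySem.List.slice cs (some i) (some j))))) := by
        rw [PySem.Set.mem_ofList, filtrate_mem_subs_iff]; exact hinf
      exact hall pat h1 h2
  cases h1 : filtrateLoopA cs incorrect
  · cases h2 : PySem.Set.isdisjoint (PySem.Set.ofList incorrect) _
    · rfl
    · exact absurd (hiff.mpr h2) (by simp [h1])
  · exact (hiff.mp h1).symm

-- startswith with the single pattern "0" tests the head character
lemma filtrate_startswith_zero (c : Char) (t : List Char) :
    PySem.Chars.startswith (c :: t) ['0'] = (c == '0') := by
  cases hc : (c == '0')
  · cases hs : PySem.Chars.startswith (c :: t) ['0']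
    · rfl
    · have hp := (PySem.Chars.startswith_iff (c :: t) ['0']).mp hs
      have h0 : '0' = c := (List.cons_prefix_cons.mp hp).1
      simp [← h0] at hc
  · exact (PySem.Chars.startswith_iff (c :: t) ['0']).mpr
      (List.cons_prefix_cons.mpr ⟨(beq_iff_eq.mp hc).symm, List.nil_prefix⟩)

-- the leading-'0' transforms agree
lemma filtrate_transform_eq (cs : List Char) :
    (if cs.length > 0 && (PySem.List.pyGet? cs 0 == some '0') then '1' :: cs else cs) =
    (if PySem.Chars.startswith cs ['0'] then '1' :: cs else cs) := by
  cases cs with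
  | nil => rfl
  | cons c t =>
      rw [filtrate_startswith_zero]
      simp [PySem.List.pyGet?, PySem.List.pyIdx?]

lemma filtrate_foldl_eq (logs : List String) (incorrect : List String) (acc : List String) :
    logs.foldl (fun clean_log l =>
      let cs := l.toList
      let cs := if cs.length > 0 && (PySem.List.pyGet? cs 0 == some '0') then '1' :: cs else cs
      if filtrateLoopA cs incorrect then clean_log ++ [String.ofList cs] else clean_log) acc =
    logs.foldl (fun clean l =>
      let cs := l.toList
      let cs := if PySem.Chars.startswith cs ['0'] then '1' :: cs else cs
      let n : Int := cs.length
      let subs : PySem.Set String := PySem.Set.ofList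
        ((PySem.List.pyRange 0 (n + 1) 1).flatMap (fun i =>
          (PySem.List.pyRange i (n + 1) 1).map (fun j =>
            String.ofList (PySem.List.slice cs (some i) (some j)))))
      if PySem.Set.isdisjoint (PySem.Set.ofList incorrect) subs
      then clean ++ [String.ofList cs] else clean) acc := by
  induction logs generalizing acc with
  | nil => rfl
  | cons l rest ih =>
      simp only [List.foldl_cons]
      rw [← filtrate_transform_eq, ← filtrate_cond_eq]
      exact ih _

-- ===== VERDICT =====
theorem filtrate_spec : Claim_equal_filtrate := by
  intro logs incorrect _
  unfold Spec_filtrate filtrate filtrate_alt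
  exact filtrate_foldl_eq logs incorrect []
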